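-- pv_equiv track=rewrite | github.com/Laila-saifan/Image-Splitting-and-Secure-Share-Distribution-over-High-speed-LAN | main2.py | split_parts_equally
-- ===== SOURCE A (Python) =====
-- def split_parts_equally(parts, device_names):
--     total_parts = len(parts)
--     num_devices = len(device_names)
--     per_device_base = total_parts // num_devices
--     remainder = total_parts % num_devices
--
--     assigned = {}
--     idx = 0
--     for i, dev in enumerate(device_names):
--         take = per_device_base + (1 if i < remainder else 0)
--         assigned[dev] = parts[idx: idx + take]
--         idx += take
--     return assigned
-- ===== SOURCE B (Python) =====
-- def split_parts_equally(parts, device_names):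
--     base, rem = divmod(len(parts), len(device_names))
--     cut = rem * (base + 1)
--     buckets = [[] for _ in device_names]
--     for j, p in enumerate(parts):
--         owner = j // (base + 1) if j < cut else rem + (j - cut) // base
--         buckets[owner].append(p)
--     return dict(zip(device_names, buckets))
-- ===== Notes on version B (the rewrite author's own statement) =====
-- stated objective: alternative
-- what changed: B inverts the traversal: instead of slicing the parts list once per device with a running cursor, it makes a single pass over the PARTS, computes each part's owning device index arithmetically, appends it to that device's bucket, and finally zips the buckets with the device names.
import Mathlib
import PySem

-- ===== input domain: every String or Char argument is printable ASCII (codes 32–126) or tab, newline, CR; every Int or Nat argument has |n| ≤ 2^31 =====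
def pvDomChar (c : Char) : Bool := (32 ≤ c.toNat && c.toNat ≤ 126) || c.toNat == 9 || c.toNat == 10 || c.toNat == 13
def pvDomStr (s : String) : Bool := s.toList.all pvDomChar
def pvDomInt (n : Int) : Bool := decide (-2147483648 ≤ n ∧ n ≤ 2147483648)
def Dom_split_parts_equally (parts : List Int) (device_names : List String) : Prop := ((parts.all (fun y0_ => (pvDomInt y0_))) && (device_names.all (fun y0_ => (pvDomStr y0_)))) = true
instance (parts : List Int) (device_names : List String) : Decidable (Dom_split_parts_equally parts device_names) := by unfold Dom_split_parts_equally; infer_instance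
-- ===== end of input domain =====

-- B inverts the traversal: one pass over the PARTS, computing each part's owning device index
-- arithmetically and appending it to that device's bucket, instead of A's per-device slicing with
-- a running cursor (objective: alternative; same results).

-- ===== PORT A =====
def split_parts_equally (parts : List Int) (device_names : List String) : List (String × List Int) :=
  let total : Int := parts.length
  let num : Int := device_names.length
  let per_device_base := PySem.Int.floordiv total num
  let remainder := PySem.Int.mod total num
  (((PySem.List.enumerate device_names).foldl
      (fun (st : PySem.Dict String (List Int) × Int) p =>
        let take := per_device_base + (if p.1 < remainder then (1 : Int) else 0)
        (st.1.insert p.2 (PySem.List.slice parts (some st.2) (some (st.2 + take))), st.2 + take))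
      (PySem.Dict.empty, 0)).1).items

-- ===== PORT B =====
-- the owner expression of Source B ('j // (base+1) if j < cut else rem + (j - cut) // base') as a helper
def pvOwner (cut base rem j : Int) : Int :=
  if j < cut then PySem.Int.floordiv j (base + 1) else rem + PySem.Int.floordiv (j - cut) base

def split_parts_equally_alt (parts : List Int) (device_names : List String) : List (String × List Int) :=
  let base := PySem.Int.floordiv (parts.length : Int) (device_names.length : Int)
  let rem := PySem.Int.mod (parts.length : Int) (device_names.length : Int)
  let cut := rem * (base + 1)
  let buckets0 : List (List Int) := device_names.map (fun _ => ([] : List Int))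
  -- buckets[owner].append(p): owner is always a nonnegative in-range index here, so .toNat indexing is exact
  let buckets := (PySem.List.enumerate parts).foldl
      (fun (bs : List (List Int)) jp => bs.modify (pvOwner cut base rem jp.1).toNat (· ++ [jp.2]))
      buckets0
  ((device_names.zip buckets).foldl (fun d nb => d.insert nb.1 nb.2) PySem.Dict.empty).items

-- ===== PRECONDITION & SPEC =====
-- Python A raises ZeroDivisionError when device_names is empty (len(parts) // 0); excluded here.
def Pre_split_parts_equally (parts : List Int) (device_names : List String) : Prop := device_names ≠ []
instance (parts : List Int) (device_names : List String) : Decidable (Pre_split_parts_equally parts device_names) := by unfold Pre_split_parts_equally; infer_instance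
def pvWitness_split_parts_equally : List Int × List String := ([1, 2, 3], ["a", "b"])
def Spec_split_parts_equally (parts : List Int) (device_names : List String) (out : List (String × List Int)) : Prop := out = split_parts_equally_alt parts device_names
instance (parts : List Int) (device_names : List String) (out : List (String × List Int)) : Decidable (Spec_split_parts_equally parts device_names out) := by unfold Spec_split_parts_equally; infer_instance

-- ===== CLAIM (what is proved, stated in full; the proofs are below) =====
def Claim_equal_split_parts_equally : Prop := ∀ (parts : List Int) (device_names : List String), Dom_split_parts_equally parts device_names → Pre_split_parts_equally parts device_names → Spec_split_parts_equally parts device_names (split_parts_equally parts device_names)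

-- ===== LEMMAS AND PROOFS =====

-- the chunk device number i receives, in A's closed form (b, r are base and remainder)
def pvChunk (parts : List Int) (b r : Nat) (i : Int) : List Int :=
  PySem.List.slice parts (some (i * (b : Int) + min i (r : Int)))
                         (some ((i + 1) * (b : Int) + min (i + 1) (r : Int)))

-- Nat form of the chunk boundary: device i's chunk is parts[pvStart i : pvStart (i+1)]
def pvStart (b r i : Nat) : Nat := i * b + min i r

-- A's loop invariant: the running idx at enumeration index s equals the closed form s*b + min s r
lemma loop_eq (parts : List Int) (b r : Nat) :
    ∀ (names : List String) (s : Int) (d : PySem.Dict String (List Int)),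
    ((PySem.List.enumerate names s).foldl
        (fun (st : PySem.Dict String (List Int) × Int) p =>
          let take := (b : Int) + (if p.1 < (r : Int) then (1 : Int) else 0)
          (st.1.insert p.2 (PySem.List.slice parts (some st.2) (some (st.2 + take))), st.2 + take))
        (d, s * (b : Int) + min s (r : Int))).1
    = (PySem.List.enumerate names s).foldl
        (fun (d : PySem.Dict String (List Int)) p => d.insert p.2 (pvChunk parts b r p.1)) d := by
  intro names
  induction names with
  | nil => intro s d; simp [PySem.List.enumerate_nil]
  | cons x xs ih =>
      intro s d
      have harith : s * (b : Int) + min s (r : Int) + ((b : Int) + (if s < (r : Int) then (1 : Int) else 0))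
          = (s + 1) * (b : Int) + min (s + 1) (r : Int) := by
        rcases lt_or_ge s (r : Int) with h | h
        · rw [if_pos h, min_eq_left (by omega), min_eq_left (by omega)]; ring
        · rw [if_neg (by omega), min_eq_right (by omega), min_eq_right (by omega)]; ring
      simp only [PySem.List.enumerate_cons, List.foldl_cons]
      rw [harith]
      have := ih (s + 1) (d.insert x (pvChunk parts b r s))
      simpa [pvChunk] using this

-- the bucket fold keeps the number of buckets
lemma fold_modify_length (f : Int → Nat) (ps : List (Int × Int)) :
    ∀ (bs : List (List Int)),
    (ps.foldl (fun bs jp => bs.modify (f jp.1) (· ++ [jp.2])) bs).length = bs.length := by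
  induction ps with
  | nil => intro bs; rfl
  | cons jp ps ih => intro bs; simp [List.foldl_cons, ih, List.length_modify]

-- bucket i of the fold collects, in order, exactly the parts whose owner index is i
lemma fold_modify_get (f : Int → Nat) (ps : List (Int × Int)) :
    ∀ (bs : List (List Int)) (i : Nat), i < bs.length →
    (ps.foldl (fun bs jp => bs.modify (f jp.1) (· ++ [jp.2])) bs)[i]? =
      some (bs[i]! ++ ps.filterMap (fun jp => if f jp.1 = i then some jp.2 else none)) := by
  induction ps with
  | nil =>
      intro bs i h
      simp [List.foldl_nil, List.filterMap_nil, List.getElem!_eq_getElem?_getD,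
        List.getElem?_eq_getElem h]
  | cons jp ps ih =>
      intro bs i h
      have h' : i < (bs.modify (f jp.1) (· ++ [jp.2])).length := by
        simpa [List.length_modify] using h
      simp only [List.foldl_cons, List.filterMap_cons]
      rw [ih _ i h']
      have hm : (bs.modify (f jp.1) (· ++ [jp.2]))[i]! =
          if f jp.1 = i then bs[i]! ++ [jp.2] else bs[i]! := by
        rw [List.getElem!_eq_getElem?_getD, List.getElem?_eq_getElem h', List.getElem_modify,
          List.getElem!_eq_getElem?_getD, List.getElem?_eq_getElem h]
        split <;> rfl
      rw [hm]
      by_cases hc : f jp.1 = i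
      · simp [hc]
      · simp [hc]

lemma pvStart_mono (b r : Nat) {i j : Nat} (h : i ≤ j) : pvStart b r i ≤ pvStart b r j := by
  unfold pvStart
  exact Nat.add_le_add (Nat.mul_le_mul_right _ h) (min_le_min_right _ h)

-- the owner of part m is a genuine index in [0,k), and m lies inside its chunk interval
lemma owner_bracket (b r k m : Nat) (hrk : r < k) (hm : m < b * k + r) :
    (pvOwner ((r : Int) * ((b : Int) + 1)) (b : Int) (r : Int) (m : Int)
        = (((pvOwner ((r : Int) * ((b : Int) + 1)) (b : Int) (r : Int) (m : Int)).toNat : Nat) : Int)) ∧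
    (pvOwner ((r : Int) * ((b : Int) + 1)) (b : Int) (r : Int) (m : Int)).toNat < k ∧
    pvStart b r (pvOwner ((r : Int) * ((b : Int) + 1)) (b : Int) (r : Int) (m : Int)).toNat ≤ m ∧
    m < pvStart b r ((pvOwner ((r : Int) * ((b : Int) + 1)) (b : Int) (r : Int) (m : Int)).toNat + 1) := by
  unfold pvOwner
  by_cases hcut : (m : Int) < (r : Int) * ((b : Int) + 1)
  · rw [if_pos hcut]
    have hbpos : (0 : Int) < (b : Int) + 1 := by positivity
    obtain ⟨hq1, hq2⟩ := (PySem.Int.floordiv_eq_iff_of_pos hbpos).mp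
      (rfl : PySem.Int.floordiv (m : Int) ((b : Int) + 1) = _)
    set q := PySem.Int.floordiv (m : Int) ((b : Int) + 1) with hqdef
    have hq0 : 0 ≤ q := by
      by_contra hneg
      push Not at hneg
      have h1 : q + 1 ≤ 0 := by omega
      have : (q + 1) * ((b : Int) + 1) ≤ 0 := mul_nonpos_of_nonpos_of_nonneg h1 (by positivity)
      have : (m : Int) < 0 := lt_of_lt_of_le hq2 this
      omega
    have hqr : q < (r : Int) := by
      have := lt_of_le_of_lt hq1 hcut
      exact lt_of_mul_lt_mul_right this (by positivity)
    have hcast : ((q.toNat : Nat) : Int) = q := Int.toNat_of_nonneg hq0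
    refine ⟨hcast.symm, ?_, ?_, ?_⟩
    · have : (q.toNat : Int) < (r : Int) := by rw [hcast]; exact hqr
      have : q.toNat < r := by exact_mod_cast this
      omega
    · have hle : q.toNat < r := by
        have : (q.toNat : Int) < (r : Int) := by rw [hcast]; exact hqr
        exact_mod_cast this
      have hmin : min q.toNat r = q.toNat := min_eq_left (le_of_lt hle)
      unfold pvStart
      rw [hmin]
      have : ((q.toNat * b + q.toNat : Nat) : Int) ≤ (m : Int) := by
        push_cast
        rw [hcast]
        nlinarith [hq1]
      exact_mod_cast this
    · have hle : q.toNat + 1 ≤ r := by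
        have : (q.toNat : Int) < (r : Int) := by rw [hcast]; exact hqr
        have : q.toNat < r := by exact_mod_cast this
        omega
      have hmin : min (q.toNat + 1) r = q.toNat + 1 := min_eq_left hle
      unfold pvStart
      rw [hmin]
      have : (m : Int) < (((q.toNat + 1) * b + (q.toNat + 1) : Nat) : Int) := by
        push_cast
        rw [hcast]
        nlinarith [hq2]
      exact_mod_cast this
  · rw [if_neg hcut]
    push Not at hcut
    have hgeN : r * (b + 1) ≤ m := by exact_mod_cast hcut
    have hb0 : 0 < b := by
      rcases Nat.eq_zero_or_pos b with h | h
      · subst h; simp at hgeN hm; omega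
      · exact h
    have hbI : (0 : Int) < (b : Int) := by exact_mod_cast hb0
    obtain ⟨hq1, hq2⟩ := (PySem.Int.floordiv_eq_iff_of_pos hbI).mp
      (rfl : PySem.Int.floordiv ((m : Int) - (r : Int) * ((b : Int) + 1)) (b : Int) = _)
    set q := PySem.Int.floordiv ((m : Int) - (r : Int) * ((b : Int) + 1)) (b : Int) with hqdef
    have hq0 : 0 ≤ q := by
      by_contra hneg
      push Not at hneg
      have h1 : q + 1 ≤ 0 := by omega
      have h2 : (q + 1) * (b : Int) ≤ 0 := mul_nonpos_of_nonpos_of_nonneg h1 (le_of_lt hbI)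
      have h3 : (m : Int) - (r : Int) * ((b : Int) + 1) < 0 := lt_of_lt_of_le hq2 h2
      omega
    have hcast : ((q.toNat : Nat) : Int) = q := Int.toNat_of_nonneg hq0
    have hqk : q < (k : Int) - (r : Int) := by
      have hmI : (m : Int) < (b : Int) * (k : Int) + (r : Int) := by exact_mod_cast hm
      have : q * (b : Int) < ((k : Int) - (r : Int)) * (b : Int) := by nlinarith [hq1]
      exact lt_of_mul_lt_mul_right this (le_of_lt hbI)
    have hoI : ((r : Int) + q).toNat = r + q.toNat := by omega
    refine ⟨by omega, ?_, ?_, ?_⟩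
    · rw [hoI]
      have h2 : ((r + q.toNat : Nat) : Int) < (k : Int) := by push_cast; rw [hcast]; omega
      exact_mod_cast h2
    · rw [hoI]
      unfold pvStart
      rw [min_eq_right (Nat.le_add_right _ _)]
      have : (((r + q.toNat) * b + r : Nat) : Int) ≤ (m : Int) := by
        push_cast
        rw [hcast]
        nlinarith [hq1]
      exact_mod_cast this
    · rw [hoI]
      unfold pvStart
      rw [min_eq_right (by omega)]
      have : (m : Int) < (((r + q.toNat + 1) * b + r : Nat) : Int) := by
        push_cast
        rw [hcast]
        nlinarith [hq2]
      exact_mod_cast this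

-- selecting an index interval out of an enumeration, tail phase: everything up to e is kept
lemma filt_take (xs : List Int) :
    ∀ (t s e : Nat), s ≤ t →
    (PySem.List.enumerate xs (t : Int)).filterMap
        (fun jp => if ((s : Int) ≤ jp.1 ∧ jp.1 < (e : Int)) then some jp.2 else none)
      = xs.take (e - t) := by
  induction xs with
  | nil => intro t s e _; simp [PySem.List.enumerate_nil]
  | cons x xs ih =>
      intro t s e hst
      rw [PySem.List.enumerate_cons, List.filterMap_cons]
      have hcast : ((t : Int) + 1) = ((t + 1 : Nat) : Int) := by push_cast; ring
      by_cases hte : t < e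
      · have hcond : ((s : Int) ≤ (t : Int) ∧ (t : Int) < (e : Int)) :=
          ⟨by exact_mod_cast hst, by exact_mod_cast hte⟩
        rw [if_pos hcond, hcast, ih (t+1) s e (by omega)]
        have h1 : e - t = (e - (t + 1)) + 1 := by omega
        rw [h1]
        rfl
      · have hcond : ¬ ((s : Int) ≤ (t : Int) ∧ (t : Int) < (e : Int)) := by
          rintro ⟨h1, h2⟩; exact hte (by exact_mod_cast h2)
        rw [if_neg hcond, hcast, ih (t+1) s e (by omega)]
        have h1 : e - t = 0 := by omega
        have h2 : e - (t+1) = 0 := by omega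
        simp [h1, h2]

-- selecting the index interval [s,e) out of an enumeration is a drop/take
lemma filt_interval (xs : List Int) :
    ∀ (t s e : Nat), t ≤ s →
    (PySem.List.enumerate xs (t : Int)).filterMap
        (fun jp => if ((s : Int) ≤ jp.1 ∧ jp.1 < (e : Int)) then some jp.2 else none)
      = (xs.drop (s - t)).take (e - s) := by
  induction xs with
  | nil => intro t s e _; simp [PySem.List.enumerate_nil]
  | cons x xs ih =>
      intro t s e hts
      by_cases heq : t = s
      · subst heq
        rw [filt_take (x :: xs) t t e (le_refl _)]
        simp
      · have hlt : t < s := lt_of_le_of_ne hts heq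
        rw [PySem.List.enumerate_cons, List.filterMap_cons]
        have hcond : ¬ ((s : Int) ≤ (t : Int) ∧ (t : Int) < (e : Int)) := by
          rintro ⟨h1, h2⟩
          have : s ≤ t := by exact_mod_cast h1
          omega
        have hcast : ((t : Int) + 1) = ((t + 1 : Nat) : Int) := by push_cast; ring
        rw [if_neg hcond, hcast, ih (t+1) s e (by omega)]
        have h1 : s - t = (s - (t + 1)) + 1 := by omega
        rw [h1, List.drop_succ_cons]

-- folding inserts over zip names/buckets = folding over the enumeration, when bucket i is chunk (t+i)
lemma zip_enum_fold (chunk : Int → List Int) :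
    ∀ (names : List String) (bs : List (List Int)) (t : Int) (d : PySem.Dict String (List Int)),
      bs.length = names.length → (∀ i (h : i < bs.length), bs[i] = chunk (t + (i : Int))) →
      (names.zip bs).foldl (fun d nb => d.insert nb.1 nb.2) d
        = (PySem.List.enumerate names t).foldl (fun d p => d.insert p.2 (chunk p.1)) d := by
  intro names
  induction names with
  | nil => intro bs t d hlen _; simp [PySem.List.enumerate_nil, List.length_eq_zero_iff.mp hlen]
  | cons x names ih =>
      intro bs t d hlen hget
      cases bs with
      | nil => simp at hlen
      | cons b0 bs =>
          have hb0 : b0 = chunk t := by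
            have := hget 0 (by simp)
            simpa using this
          rw [PySem.List.enumerate_cons]
          simp only [List.zip_cons_cons, List.foldl_cons]
          rw [hb0]
          apply ih bs (t + 1) _ (by simpa using hlen)
          intro i h
          have hh := hget (i + 1) (by simpa using Nat.succ_lt_succ h)
          push_cast at hh
          simp only [List.getElem_cons_succ] at hh
          rw [hh]; congr 1; ring

-- ===== VERDICT (by name: the statement is the Claim_ definition above) =====
theorem split_parts_equally_spec : Claim_equal_split_parts_equally := by
  intro parts names _ hpre
  unfold Spec_split_parts_equally split_parts_equally split_parts_equally_alt
  have hk : 0 < names.length := List.length_pos_of_ne_nil hpre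
  simp only [PySem.Int.floordiv_natCast, PySem.Int.mod_natCast]
  set n := parts.length with hn
  set k := names.length with hkdef
  set b := n / k with hb
  set r := n % k with hr
  -- A side: replace the cursor loop by the closed-form chunks
  have hA := loop_eq parts b r names 0 PySem.Dict.empty
  rw [show ((0:Int) * (b : Int) + min 0 (r : Int)) = 0 by
        rw [zero_mul, zero_add, min_eq_left (Int.natCast_nonneg r)]] at hA
  rw [hA]
  -- B side: characterize the buckets and turn the zip fold into the same enumeration fold
  set f : Int → Nat := fun j => (pvOwner ((r:Int) * ((b:Int)+1)) (b:Int) (r:Int) j).toNat with hf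
  set buckets0 : List (List Int) := names.map (fun _ => ([] : List Int)) with hb0
  set bks := (PySem.List.enumerate parts).foldl
      (fun (bs : List (List Int)) jp => bs.modify (f jp.1) (· ++ [jp.2])) buckets0 with hbks
  have hlen0 : buckets0.length = k := by simp [hb0, hkdef]
  have hlen : bks.length = k := by rw [hbks, fold_modify_length]; exact hlen0
  have hnk : b * k + r = n := by rw [hb, hr, Nat.mul_comm]; exact Nat.div_add_mod n k
  have hrk : r < k := Nat.mod_lt _ hk
  have hbucket : ∀ i (h : i < bks.length), bks[i] = pvChunk parts b r (0 + (i : Int)) := by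
    intro i hi
    have hik : i < k := by rwa [hlen] at hi
    have hi0 : i < buckets0.length := by rwa [hlen0]
    have hget := fold_modify_get f (PySem.List.enumerate parts) buckets0 i hi0
    have hempty : buckets0[i]! = [] := by
      rw [List.getElem!_eq_getElem?_getD, hb0]
      simp [← hkdef, hik]
    rw [hempty, List.nil_append] at hget
    -- rewrite the owner test into the interval test, pointwise on members of the enumeration
    have hcong : (PySem.List.enumerate parts).filterMap
          (fun jp => if f jp.1 = i then some jp.2 else none)
        = (PySem.List.enumerate parts).filterMap
          (fun jp => if (((pvStart b r i : Nat) : Int) ≤ jp.1 ∧ jp.1 < ((pvStart b r (i+1) : Nat) : Int)) then some jp.2 else none) := by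
      apply List.filterMap_congr
      intro jp hjp
      obtain ⟨m, hmlt, hjpeq⟩ := (PySem.List.mem_enumerate_iff parts 0 jp).mp hjp
      subst hjpeq
      simp only [zero_add]
      have H := owner_bracket b r k m hrk (by omega)
      have hiff : (f (m : Int) = i) ↔
          (((pvStart b r i : Nat) : Int) ≤ (m : Int) ∧ (m : Int) < ((pvStart b r (i+1) : Nat) : Int)) := by
        constructor
        · intro he
          have he' : (pvOwner ((r:Int) * ((b:Int)+1)) (b:Int) (r:Int) (m:Int)).toNat = i := he
          refine ⟨?_, ?_⟩
          · rw [← he']; exact_mod_cast H.2.2.1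
          · rw [← he']; exact_mod_cast H.2.2.2
        · rintro ⟨h1, h2⟩
          have h1' : pvStart b r i ≤ m := by exact_mod_cast h1
          have h2' : m < pvStart b r (i+1) := by exact_mod_cast h2
          rw [hf]
          by_contra hne
          have hne' : (pvOwner ((r:Int) * ((b:Int)+1)) (b:Int) (r:Int) (m:Int)).toNat ≠ i := hne
          rcases Nat.lt_or_ge (pvOwner ((r:Int) * ((b:Int)+1)) (b:Int) (r:Int) (m:Int)).toNat i with hlt | hge
          · have hmono := pvStart_mono b r (show (pvOwner ((r:Int) * ((b:Int)+1)) (b:Int) (r:Int) (m:Int)).toNat + 1 ≤ i by omega)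
            have hub := H.2.2.2
            omega
          · have hgt : i < (pvOwner ((r:Int) * ((b:Int)+1)) (b:Int) (r:Int) (m:Int)).toNat := by omega
            have hmono := pvStart_mono b r (show i + 1 ≤ (pvOwner ((r:Int) * ((b:Int)+1)) (b:Int) (r:Int) (m:Int)).toNat by omega)
            have hlb := H.2.2.1
            omega
      exact if_congr hiff rfl rfl
    have hfi := filt_interval parts 0 (pvStart b r i) (pvStart b r (i+1)) (Nat.zero_le _)
    simp only [Nat.cast_zero, Nat.sub_zero] at hfi
    rw [hcong, hfi] at hget
    have hchunk : pvChunk parts b r ((i : Nat) : Int)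
        = (parts.drop (pvStart b r i)).take (pvStart b r (i+1) - pvStart b r i) := by
      unfold pvChunk pvStart
      have e1 : ((i:Int) * (b:Int) + min (i:Int) (r:Int)) = ((i * b + min i r : Nat) : Int) := by
        push_cast; ring
      have e2 : (((i:Int) + 1) * (b:Int) + min ((i:Int) + 1) (r:Int)) = (((i+1) * b + min (i+1) r : Nat) : Int) := by
        push_cast; ring
      rw [e1, e2, PySem.List.slice_natCast]
    rw [show (0 + (i : Int)) = ((i : Nat) : Int) by ring, hchunk]
    have := List.getElem?_eq_getElem hi
    rw [this] at hget
    exact Option.some.inj hget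
  rw [zip_enum_fold (pvChunk parts b r) names bks 0 PySem.Dict.empty (by rw [hlen, hkdef]) hbucket]
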